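-- pv_equiv track=rewrite | github.com/tmayer2000/a2-CSC108 | a2.py | can_hike_to
-- ===== SOURCE A (Python) =====
-- from typing import List
--
-- def can_hike_to(m: List[List[int]], s: List[int], d: List[int], supplies: int) -> bool:
--     """
--     Given an elevation map m, a start cell s, a destination cell d, and
--     the an amount of supplies returns True if and only if a hiker could reach
--     d from s using the strategy dscribed in the assignment .pdf. Read the .pdf
--     carefully. Assume d is always south, east, or south-east of s. The hiker
--     never travels, north, west, nor backtracks.
--
--     Examples (note some spacing has been added for human readablity)
--     >>> m = [[1,4,3],
--              [2,3,5],
--              [5,4,3]]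
--     >>> can_hike_to(m, [0,0], [2,2], 4)
--     True
--     >>> can_hike_to(m, [0,0], [0,0], 0)
--     True
--     >>> can_hike_to(m, [0,0], [2,2], 3)
--     False
--     >>> m = [[1,  1,100],
--              [1,100,100],
--              [1,  1,  1]]
--     >>> can_hike_to(m, [0,0], [2,2], 4)
--     False
--     >>> can_hike_to(m, [0,0], [2,2], 202)
--     True
--     """
--     if s == d:
--         return True
--     spot = s
--     i = spot[0]
--     j = spot[1]
--     while supplies > 0:
--         if spot == d:
--             break
--         i = spot[0]
--         j = spot[1]
--         if i == d[0]:
--             supplies = supplies - abs((m[i][j] - m[i][j + 1]))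
--             if supplies < 0:
--                 return False
--             spot = [i, j + 1]
--         elif j == d[1]:
--             supplies = supplies - abs((m[i][j] - m[i + 1][j]))
--             if supplies < 0:
--                 return False
--             spot = [i + 1, j]
--         else:
--             south = m[i + 1][j]
--             east = m[i][j + 1]
--             next = [east, south]
--             pos = next.index(min(next))
--             if pos == 0:
--                 supplies = supplies - abs((m[i][j] - m[i][j + 1]))
--                 if supplies < 0:
--                     return False
--                 spot = [i, j + 1]
--             else:
--                 supplies = supplies - abs((m[i][j] - m[i + 1][j]))
--                 if supplies < 0:
--                     return False
--                 spot = [i + 1, j]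
--     if spot == d:
--         return True
--     return False
-- ===== SOURCE B (Python) =====
-- from typing import List
--
-- def _greedy_costs(m: List[List[int]], s: List[int], d: List[int]) -> List[int]:
--     """Step costs (abs elevation differences) along the greedy path from s to d."""
--     i, j = s[0], s[1]
--     di, dj = d[0], d[1]
--     costs = []
--     while i != di or j != dj:
--         if i != di and (j == dj or m[i + 1][j] < m[i][j + 1]):
--             costs.append(abs(m[i][j] - m[i + 1][j]))
--             i += 1
--         else:
--             costs.append(abs(m[i][j] - m[i][j + 1]))
--             j += 1
--     return costs
--
-- def can_hike_to(m: List[List[int]], s: List[int], d: List[int], supplies: int) -> bool: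
--     if s == d:
--         return True
--     if supplies <= 0:
--         return False
--     costs = _greedy_costs(m, s, d)
--     spent = 0
--     for c in costs[:-1]:
--         spent += c
--         if spent >= supplies:
--             return False
--     return spent + costs[-1] <= supplies
-- ===== Notes on version B (the rewrite author's own statement) =====
-- stated objective: alternative
-- what changed: B splits A's single budget-tracking walk into two passes: pass one builds the greedy path's list of step costs (ignoring supplies), pass two checks the budget against that cost list (every proper prefix sum strictly below supplies, total at most supplies), with explicit s==d and supplies<=0 early exits.
-- outside the precondition, e.g. on can_hike_to([[1, 2]], [0, 0], [0, 0, 0], 1): A returns False, B raises IndexError; on can_hike_to([[0], [0]], [-1, 0], [1, 0], 1): A returns True, B returns True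
import Mathlib
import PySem

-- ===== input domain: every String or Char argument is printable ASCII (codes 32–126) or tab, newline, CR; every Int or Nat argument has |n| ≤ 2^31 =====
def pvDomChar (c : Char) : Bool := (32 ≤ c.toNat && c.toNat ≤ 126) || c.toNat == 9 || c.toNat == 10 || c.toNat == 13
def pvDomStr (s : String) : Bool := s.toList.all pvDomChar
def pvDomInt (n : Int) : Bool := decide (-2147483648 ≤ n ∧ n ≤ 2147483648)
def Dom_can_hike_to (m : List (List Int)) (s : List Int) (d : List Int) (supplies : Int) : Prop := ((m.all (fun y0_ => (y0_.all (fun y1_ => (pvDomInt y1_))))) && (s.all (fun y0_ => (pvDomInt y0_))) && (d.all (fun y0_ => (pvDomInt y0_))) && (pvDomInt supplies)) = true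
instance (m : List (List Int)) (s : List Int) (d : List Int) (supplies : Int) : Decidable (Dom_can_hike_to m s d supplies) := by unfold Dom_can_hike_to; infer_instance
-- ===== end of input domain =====

-- B re-decomposes A's single budget-tracking walk into two passes (build greedy step costs, then
-- check the budget); alternative decomposition, same cost.

-- ===== PORT A =====
-- A's while-loop as fuelled recursion on the state (spot, supplies); i, j are recomputed from
-- spot each iteration exactly as A does; indexing via PySem.List.pyGetD (defaults unreachable
-- inside Pre_); fuel = Manhattan distance + 1 never runs out inside Pre_ (the walk breaks first).
def canHikeLoopA (m : List (List Int)) (d : List Int) : Nat → List Int → Int → Bool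
  | 0, spot, _ => spot == d
  | fuel + 1, spot, supplies =>
    if supplies ≤ 0 then spot == d              -- while supplies > 0 fails → final spot == d check
    else if spot == d then true                  -- break → final check succeeds
    else
      let i := PySem.List.pyGetD spot 0 0
      let j := PySem.List.pyGetD spot 1 0
      if i == PySem.List.pyGetD d 0 0 then
        let supplies' := supplies - |PySem.List.pyGetD (PySem.List.pyGetD m i []) j 0 - PySem.List.pyGetD (PySem.List.pyGetD m i []) (j + 1) 0|
        if supplies' < 0 then false else canHikeLoopA m d fuel [i, j + 1] supplies'
      else if j == PySem.List.pyGetD d 1 0 then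
        let supplies' := supplies - |PySem.List.pyGetD (PySem.List.pyGetD m i []) j 0 - PySem.List.pyGetD (PySem.List.pyGetD m (i + 1) []) j 0|
        if supplies' < 0 then false else canHikeLoopA m d fuel [i + 1, j] supplies'
      else
        let south := PySem.List.pyGetD (PySem.List.pyGetD m (i + 1) []) j 0
        let east := PySem.List.pyGetD (PySem.List.pyGetD m i []) (j + 1) 0
        if east ≤ south then                     -- next.index(min([east, south])) == 0 ⟺ east ≤ south
          let supplies' := supplies - |PySem.List.pyGetD (PySem.List.pyGetD m i []) j 0 - east|
          if supplies' < 0 then false else canHikeLoopA m d fuel [i, j + 1] supplies'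
        else
          let supplies' := supplies - |PySem.List.pyGetD (PySem.List.pyGetD m i []) j 0 - south|
          if supplies' < 0 then false else canHikeLoopA m d fuel [i + 1, j] supplies'

def can_hike_to (m : List (List Int)) (s : List Int) (d : List Int) (supplies : Int) : Bool :=
  if s == d then true
  else
    canHikeLoopA m d
      ((PySem.List.pyGetD d 0 0 - PySem.List.pyGetD s 0 0).toNat
        + (PySem.List.pyGetD d 1 0 - PySem.List.pyGetD s 1 0).toNat + 1)
      s supplies

-- ===== PORT B =====
-- pass 1 of Source B (_greedy_costs): the list of step costs along the greedy path, fuelled by the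
-- Manhattan distance (exact inside Pre_).
def greedyCosts (m : List (List Int)) (di dj : Int) : Nat → Int → Int → List Int
  | 0, _, _ => []
  | fuel + 1, i, j =>
    if i == di && j == dj then []
    else if i != di && (j == dj || PySem.List.pyGetD (PySem.List.pyGetD m (i + 1) []) j 0 < PySem.List.pyGetD (PySem.List.pyGetD m i []) (j + 1) 0) then
      |PySem.List.pyGetD (PySem.List.pyGetD m i []) j 0 - PySem.List.pyGetD (PySem.List.pyGetD m (i + 1) []) j 0| :: greedyCosts m di dj fuel (i + 1) j
    else
      |PySem.List.pyGetD (PySem.List.pyGetD m i []) j 0 - PySem.List.pyGetD (PySem.List.pyGetD m i []) (j + 1) 0| :: greedyCosts m di dj fuel i (j + 1)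

-- pass 2 of Source B: the for-loop over costs[:-1]; some spent = loop finished, none = early False.
def spendPrefix : List Int → Int → Int → Option Int
  | [], _, spent => some spent
  | c :: rest, supplies, spent =>
    let spent' := spent + c
    if supplies ≤ spent' then none else spendPrefix rest supplies spent'

def can_hike_to_alt (m : List (List Int)) (s : List Int) (d : List Int) (supplies : Int) : Bool :=
  if s == d then true
  else if supplies ≤ 0 then false
  else
    let di := PySem.List.pyGetD d 0 0
    let dj := PySem.List.pyGetD d 1 0
    let i := PySem.List.pyGetD s 0 0
    let j := PySem.List.pyGetD s 1 0
    let costs := greedyCosts m di dj ((di - i).toNat + (dj - j).toNat) i j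
    match spendPrefix costs.dropLast supplies 0 with
    | none => false
    | some spent => decide (spent + PySem.List.pyGetD costs (-1) 0 ≤ supplies)   -- costs[-1]

-- ===== PRECONDITION & SPEC =====
-- Pre_ excludes inputs where s or d is not a 2-element coordinate list with 0 ≤ s ≤ d inside m's
-- grid (unless s == d, or supplies ≤ 0 with s at least 2 long, where A reads no cell): on those A
-- typically raises IndexError, and where it still returns the value is an accident of
-- negative-index wraparound or of a malformed destination list that the walk can never equal.
def Pre_can_hike_to (m : List (List Int)) (s : List Int) (d : List Int) (supplies : Int) : Prop :=
  s = d ∨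
  (2 ≤ s.length ∧ supplies ≤ 0) ∨
  (s.length = 2 ∧ d.length = 2 ∧
   0 ≤ s.getD 0 0 ∧ 0 ≤ s.getD 1 0 ∧
   s.getD 0 0 ≤ d.getD 0 0 ∧ s.getD 1 0 ≤ d.getD 1 0 ∧
   d.getD 0 0 < (m.length : Int) ∧
   ∀ i ∈ List.range m.length, s.getD 0 0 ≤ (i : Int) → (i : Int) ≤ d.getD 0 0 →
     d.getD 1 0 < ((m.getD i []).length : Int))
instance (m : List (List Int)) (s : List Int) (d : List Int) (supplies : Int) : Decidable (Pre_can_hike_to m s d supplies) := by unfold Pre_can_hike_to; infer_instance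

def pvWitness_can_hike_to : List (List Int) × List Int × List Int × Int :=
  ([[1, 4, 3], [2, 3, 5], [5, 4, 3]], [0, 0], [2, 2], 4)

def Spec_can_hike_to (m : List (List Int)) (s : List Int) (d : List Int) (supplies : Int) (out : Bool) : Prop := out = can_hike_to_alt m s d supplies
instance (m : List (List Int)) (s : List Int) (d : List Int) (supplies : Int) (out : Bool) : Decidable (Spec_can_hike_to m s d supplies out) := by unfold Spec_can_hike_to; infer_instance

-- ===== CLAIM (what is proved, stated in full; the proofs are below) =====
def Claim_equal_can_hike_to : Prop := ∀ (m : List (List Int)) (s : List Int) (d : List Int) (supplies : Int), Dom_can_hike_to m s d supplies → Pre_can_hike_to m s d supplies → Spec_can_hike_to m s d supplies (can_hike_to m s d supplies)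

-- ===== LEMMAS AND PROOFS =====

-- common denominator of both ports: pay the cost list left to right, failing when supplies are
-- exhausted before a step or overdrawn by one.
def hikeBudget : List Int → Int → Bool
  | [], _ => true
  | c :: cs, supplies =>
    if supplies ≤ 0 then false
    else if supplies - c < 0 then false
    else hikeBudget cs (supplies - c)

theorem hikeBudget_cons (c : Int) (cs : List Int) (s : Int) :
    hikeBudget (c :: cs) s
      = if s ≤ 0 then false else if s - c < 0 then false else hikeBudget cs (s - c) := rfl

theorem pyGetD_pair_zero (a b d : Int) : PySem.List.pyGetD [a, b] 0 d = a := by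
  simp [PySem.List.pyGetD, PySem.List.pyGet?, PySem.List.pyIdx?]

theorem pyGetD_pair_one (a b d : Int) : PySem.List.pyGetD [a, b] 1 d = b := by
  simp [PySem.List.pyGetD, PySem.List.pyGet?, PySem.List.pyIdx?]

theorem loopA_eq_budget (m : List (List Int)) (di dj : Int) (n : Nat) :
    ∀ (i j supplies : Int), i ≤ di → j ≤ dj → ((di - i).toNat + (dj - j).toNat) = n →
      canHikeLoopA m [di, dj] (n + 1) [i, j] supplies
        = hikeBudget (greedyCosts m di dj n i j) supplies := by
  induction n with
  | zero =>
      intro i j supplies hi hj hn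
      have h1 : i = di := by omega
      have h2 : j = dj := by omega
      subst h1; subst h2
      simp [canHikeLoopA, greedyCosts, hikeBudget]
  | succ n ihn =>
      intro i j supplies hi hj hn
      have hne : ¬(i = di ∧ j = dj) := by
        rintro ⟨rfl, rfl⟩; omega
      rw [canHikeLoopA, greedyCosts]
      simp only [pyGetD_pair_zero, pyGetD_pair_one]
      by_cases hs : supplies ≤ 0
      · rw [if_pos hs]
        split
        next hcond => exact absurd (by simpa using hcond) hne
        next hcond =>
          split <;> · simp [hikeBudget_cons, hs]
                      exact fun h1 h2 => hne ⟨h1, h2⟩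
      · rw [if_neg hs]
        by_cases hdi : i = di
        · have hdj : j ≠ dj := fun h => hne ⟨hdi, h⟩
          simp [hdi, hdj, hikeBudget_cons, hs]
          congr 1
          exact ihn di (j + 1) _ le_rfl (by omega) (by omega)
        · by_cases hdj : j = dj
          · simp [hdi, hdj, hikeBudget_cons, hs]
            congr 1
            exact ihn (i + 1) dj _ (by omega) le_rfl (by omega)
          · by_cases hes : PySem.List.pyGetD (PySem.List.pyGetD m i []) (j + 1) 0 ≤ PySem.List.pyGetD (PySem.List.pyGetD m (i + 1) []) j 0
            · simp [hdi, hdj, hes, not_lt.mpr hes, hikeBudget_cons, hs]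
              congr 1
              exact ihn i (j + 1) _ (by omega) (by omega) (by omega)
            · simp [hdi, hdj, hes, not_le.mp hes, hikeBudget_cons, hs]
              congr 1
              exact ihn (i + 1) j _ (by omega) (by omega) (by omega)
theorem pass2_eq_budget (supplies : Int) :
    ∀ (cs : List Int) (spent : Int), spent < supplies →
      (match spendPrefix cs.dropLast supplies spent with
       | none => false
       | some sp => decide (sp + PySem.List.pyGetD cs (-1) 0 ≤ supplies))
        = hikeBudget cs (supplies - spent) := by
  intro cs
  induction cs with
  | nil =>
      intro spent h
      simp only [List.dropLast_nil, spendPrefix, hikeBudget]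
      simp [PySem.List.pyGetD, PySem.List.pyGet?]
      omega
  | cons c rest ih =>
      intro spent h
      cases rest with
      | nil =>
          have hd1 : ([c] : List Int).dropLast = [] := by simp [List.dropLast]
          rw [hd1]
          simp only [spendPrefix]
          rw [PySem.List.pyGetD_neg_one (xs := [c]) (h := by simp)]
          simp only [List.getLast, hikeBudget]
          split_ifs <;> simp <;> omega
      | cons r rs =>
          have hlast : PySem.List.pyGetD (c :: r :: rs) (-1) 0
              = PySem.List.pyGetD (r :: rs) (-1) 0 := by
            rw [PySem.List.pyGetD_neg_one (h := by simp), PySem.List.pyGetD_neg_one (h := by simp)]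
            simp [List.getLast]
          have hdrop : (c :: r :: rs).dropLast = c :: (r :: rs).dropLast := by
            simp [List.dropLast]
          rw [hdrop, hlast]
          simp only [spendPrefix]
          by_cases hc : supplies ≤ spent + c
          · simp only [if_pos hc]
            rw [hikeBudget_cons, if_neg (by omega)]
            by_cases h2 : supplies - spent - c < 0
            · rw [if_pos h2]
            · rw [if_neg h2, hikeBudget_cons, if_pos (by omega)]
          · simp only [if_neg hc]
            rw [ih (spent + c) (by omega)]
            have he : supplies - (spent + c) = supplies - spent - c := by ring
            rw [he]
            conv_rhs => rw [hikeBudget_cons]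
            rw [if_neg (by omega), if_neg (by omega)]

-- ===== VERDICT (by name: the statement is the Claim_ definition above) =====
theorem can_hike_to_spec : Claim_equal_can_hike_to := by
  intro m s d supplies _hdom hpre
  unfold Spec_can_hike_to
  by_cases hsd : s = d
  · subst hsd
    simp [can_hike_to, can_hike_to_alt]
  · have hbeq : (s == d) = false := beq_eq_false_iff_ne.mpr hsd
    rcases hpre with rfl | ⟨_hslen, hsup⟩ | ⟨hslen, hdlen, hc1, hc2, hc3, hc4, hc5, hc6⟩
    · exact absurd rfl hsd
    · simp [can_hike_to, can_hike_to_alt, hbeq, hsup, canHikeLoopA]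
    · obtain ⟨s0, s1, rfl⟩ := List.length_eq_two.mp hslen
      obtain ⟨d0, d1, rfl⟩ := List.length_eq_two.mp hdlen
      by_cases hsup : supplies ≤ 0
      · simp [can_hike_to, can_hike_to_alt, hbeq, hsup, canHikeLoopA]
      · simp at hc1 hc2 hc3 hc4
        simp only [can_hike_to, can_hike_to_alt, hbeq, Bool.false_eq_true, if_false,
          if_neg hsup, pyGetD_pair_zero, pyGetD_pair_one]
        rw [loopA_eq_budget m d0 d1 _ s0 s1 supplies (by omega) (by omega) rfl]
        rw [pass2_eq_budget supplies _ 0 (by omega)]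
        simp
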